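-- pv_equiv track=rewrite | github.com/yoanyuruena2004-ctrl/distrinova-erp | TALLER_2/punto_8_giffler_terminacion mas corta.py | giffler_thompson_earliest_start_rpt
-- ===== SOURCE A (Python) =====
-- def giffler_thompson_earliest_start_rpt(jobs, release_times):
--     num_machines = 4
--     machine_free = [0] * num_machines
--     job_next_op = [0] * len(jobs)
--     job_ready_time = release_times[:]
--     schedule = []
--
--     def remaining_processing_time(job_index):
--         total = 0
--         for op_index in range(job_next_op[job_index], len(jobs[job_index])):
--             total += jobs[job_index][op_index][1]
--         return total
--
--     while True:
--         available_ops = []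
--         for j in range(len(jobs)):
--             if job_next_op[j] < len(jobs[j]):
--                 op_index = job_next_op[j]
--                 machine, time = jobs[j][op_index]
--                 start_time = max(machine_free[machine-1], job_ready_time[j])
--                 available_ops.append((j, op_index, machine, start_time, time))
--
--         if not available_ops:
--             break
--
--         min_start = min(available_ops, key=lambda x: x[3])[3]
--         candidate_ops = [op for op in available_ops if op[3] == min_start]
--         if len(candidate_ops) > 1:
--             candidate_ops.sort(key=lambda x: remaining_processing_time(x[0]), reverse=True)
--         chosen = candidate_ops[0]
--         j, op_index, machine, start, time = chosen
--         finish = start + time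
--         schedule.append((j, op_index, machine, start, finish))
--         machine_free[machine-1] = finish
--         job_ready_time[j] = finish
--         job_next_op[j] += 1
--
--     return schedule, machine_free, job_ready_time
-- ===== SOURCE B (Python) =====
-- def giffler_thompson_earliest_start_rpt(jobs, release_times):
--     machine_free = [0, 0, 0, 0]
--     job_next_op = [0] * len(jobs)
--     job_ready_time = release_times[:]
--     rpt = [sum(t for _, t in job) for job in jobs]
--     schedule = []
--     remaining = sum(len(job) for job in jobs)
--     for _ in range(remaining):
--         best = None  # ((start, -rpt), j, k, m, s, t); first lexicographic minimum wins
--         for j in range(len(jobs)):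
--             k = job_next_op[j]
--             if k < len(jobs[j]):
--                 m, t = jobs[j][k]
--                 s = max(machine_free[m - 1], job_ready_time[j])
--                 key = (s, -rpt[j])
--                 if best is None or key < best[0]:
--                     best = (key, j, k, m, s, t)
--         _, j, k, m, s, t = best
--         f = s + t
--         schedule.append((j, k, m, s, f))
--         machine_free[m - 1] = f
--         job_ready_time[j] = f
--         job_next_op[j] += 1
--         rpt[j] -= t
--     return schedule, machine_free, job_ready_time
-- ===== Notes on version B (the rewrite author's own statement) =====
-- stated objective: alternative
-- what changed: Replaces each round's build-list/min/filter/stable-sort selection (with remaining processing time re-summed for every comparison) by a single linear pass keeping the first operation minimal under the lexicographic key (start, -RPT), with RPT maintained decrementally, iterating exactly total-op-count times instead of while-True/break.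
import Mathlib
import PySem

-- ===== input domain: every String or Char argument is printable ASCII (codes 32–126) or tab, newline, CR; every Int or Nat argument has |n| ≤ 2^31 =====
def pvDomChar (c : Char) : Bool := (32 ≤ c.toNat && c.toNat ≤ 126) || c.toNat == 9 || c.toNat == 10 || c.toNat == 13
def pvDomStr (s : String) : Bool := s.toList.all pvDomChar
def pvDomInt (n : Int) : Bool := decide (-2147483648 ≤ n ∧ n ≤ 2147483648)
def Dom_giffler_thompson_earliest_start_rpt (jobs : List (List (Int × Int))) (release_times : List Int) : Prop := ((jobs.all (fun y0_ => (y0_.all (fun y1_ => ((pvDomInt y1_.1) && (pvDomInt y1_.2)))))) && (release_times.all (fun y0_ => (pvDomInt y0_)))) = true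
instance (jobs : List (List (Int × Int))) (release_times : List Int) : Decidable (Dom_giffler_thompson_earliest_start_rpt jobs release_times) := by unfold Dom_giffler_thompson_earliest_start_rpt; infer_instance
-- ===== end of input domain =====

-- B replaces A's per-round build-list/min/filter/stable-sort selection (with remaining processing time
-- re-summed on every comparison) by one linear pass keeping the first operation minimal under the
-- lexicographic key (start, -RPT), with RPT maintained decrementally, and a for-loop over the exact
-- operation count instead of while-True/break. Neither Python mutates its arguments.

-- ===== PORT A =====
-- remaining_processing_time: sums jobs[j][i][1] for i in range(job_next_op[j], len(jobs[j]))
def pvRptA (jobs : List (List (Int × Int))) (next : List Nat) (j : Nat) : Int :=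
  (List.range' (next.getD j 0) ((jobs.getD j []).length - next.getD j 0)).foldl
    (fun total op_index => total + ((jobs.getD j []).getD op_index (0, 0)).2) 0

-- the available_ops list built by the for-loop over range(len(jobs))
def pvAvailA (jobs : List (List (Int × Int))) (next : List Nat) (mfree ready : List Int) :
    List (Nat × Nat × Int × Int × Int) :=
  (List.range jobs.length).foldl (fun acc j =>
    if next.getD j 0 < (jobs.getD j []).length then
      acc ++ [(j, next.getD j 0, ((jobs.getD j []).getD (next.getD j 0) (0, 0)).1,
               max (PySem.List.pyGetD mfree (((jobs.getD j []).getD (next.getD j 0) (0, 0)).1 - 1) 0)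
                   (ready.getD j 0),
               ((jobs.getD j []).getD (next.getD j 0) (0, 0)).2)]
    else acc) []

-- the while-True loop; fuel = one more than the number of remaining operations at the call
def pvLoopA (jobs : List (List (Int × Int))) : Nat → List Nat → List Int → List Int →
    List (Int × Int × Int × Int × Int) → (List (Int × Int × Int × Int × Int)) × List Int × List Int
  | 0, _, mfree, ready, sched => (sched, mfree, ready)
  | fuel + 1, next, mfree, ready, sched =>
    match pvAvailA jobs next mfree ready with
    | [] => (sched, mfree, ready)
    | a :: rest =>
      let avail := a :: rest
      let min_start := (PySem.List.minD avail (fun x => x.2.2.2.1) a).2.2.2.1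
      let cands := avail.filter (fun x => x.2.2.2.1 == min_start)
      let cands2 := if 1 < cands.length then PySem.List.sorted cands (fun x => pvRptA jobs next x.1) true
                    else cands
      match cands2 with
      | [] => (sched, mfree, ready)  -- unreachable: cands is never empty
      | (j, k, m, s, t) :: _ =>
        pvLoopA jobs fuel (next.set j (next.getD j 0 + 1))
          (PySem.List.pySetD mfree (m - 1) (s + t)) (ready.set j (s + t))
          (sched ++ [((j : Int), (k : Int), m, s, s + t)])

def giffler_thompson_earliest_start_rpt (jobs : List (List (Int × Int))) (release_times : List Int) :
    (List (Int × Int × Int × Int × Int)) × List Int × List Int :=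
  pvLoopA jobs ((jobs.map List.length).sum + 1) (List.replicate jobs.length 0)
    (List.replicate 4 0) release_times []

-- ===== PORT B =====
def pvLexLt (a b : Int × Int) : Bool := a.1 < b.1 || (a.1 == b.1 && a.2 < b.2)

-- one linear pass: first operation minimal under the key (start, -rpt[j])
def pvBestB (jobs : List (List (Int × Int))) (next : List Nat) (mfree ready rpt : List Int) :
    Option ((Int × Int) × (Nat × Nat × Int × Int × Int)) :=
  (List.range jobs.length).foldl (fun best j =>
    if next.getD j 0 < (jobs.getD j []).length then
      let k := next.getD j 0
      let m := ((jobs.getD j []).getD k (0, 0)).1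
      let t := ((jobs.getD j []).getD k (0, 0)).2
      let s := max (PySem.List.pyGetD mfree (m - 1) 0) (ready.getD j 0)
      let key := (s, -(rpt.getD j 0))
      match best with
      | none => some (key, (j, k, m, s, t))
      | some b => if pvLexLt key b.1 then some (key, (j, k, m, s, t)) else best
    else best) none

-- the for-loop over range(remaining)
def pvLoopB (jobs : List (List (Int × Int))) : Nat → List Nat → List Int → List Int → List Int →
    List (Int × Int × Int × Int × Int) → (List (Int × Int × Int × Int × Int)) × List Int × List Int
  | 0, _, mfree, ready, _, sched => (sched, mfree, ready)
  | c + 1, next, mfree, ready, rpt, sched =>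
    match pvBestB jobs next mfree ready rpt with
    | none => (sched, mfree, ready)  -- unreachable: some operation always remains
    | some (_, (j, k, m, s, t)) =>
      pvLoopB jobs c (next.set j (next.getD j 0 + 1))
        (PySem.List.pySetD mfree (m - 1) (s + t)) (ready.set j (s + t))
        (rpt.set j (rpt.getD j 0 - t)) (sched ++ [((j : Int), (k : Int), m, s, s + t)])

def giffler_thompson_earliest_start_rpt_alt (jobs : List (List (Int × Int))) (release_times : List Int) :
    (List (Int × Int × Int × Int × Int)) × List Int × List Int :=
  pvLoopB jobs ((jobs.map List.length).sum) (List.replicate jobs.length 0) (List.replicate 4 0)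
    release_times (jobs.map (fun job => ((job.map (fun p => p.2)).sum))) []

-- ===== PRECONDITION & SPEC =====
-- Pre_ excludes exactly the inputs on which the Python A raises IndexError: an operation whose
-- machine number m makes m-1 fall outside the 4-slot machine_free list (machines -3..4 are fine,
-- Python's negative indexing included), or a nonempty job whose index has no release time.
def Pre_giffler_thompson_earliest_start_rpt (jobs : List (List (Int × Int))) (release_times : List Int) : Prop :=
  (∀ job ∈ jobs, ∀ p ∈ job, PySem.Raise.InRange 4 (p.1 - 1)) ∧
  (∀ j ∈ List.range jobs.length, jobs.getD j [] = [] ∨ j < release_times.length)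
instance (jobs : List (List (Int × Int))) (release_times : List Int) : Decidable (Pre_giffler_thompson_earliest_start_rpt jobs release_times) := by unfold Pre_giffler_thompson_earliest_start_rpt; infer_instance
def pvWitness_giffler_thompson_earliest_start_rpt : (List (List (Int × Int))) × List Int :=
  ([[(1, 2), (2, 1)], [(2, 3)]], [0, 1])

def Spec_giffler_thompson_earliest_start_rpt (jobs : List (List (Int × Int))) (release_times : List Int) (out : (List (Int × Int × Int × Int × Int)) × List Int × List Int) : Prop := out = giffler_thompson_earliest_start_rpt_alt jobs release_times
instance (jobs : List (List (Int × Int))) (release_times : List Int) (out : (List (Int × Int × Int × Int × Int)) × List Int × List Int) : Decidable (Spec_giffler_thompson_earliest_start_rpt jobs release_times out) := by unfold Spec_giffler_thompson_earliest_start_rpt; infer_instance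

-- ===== CLAIM (what is proved, stated in full; the proofs are below) =====
def Claim_equal_giffler_thompson_earliest_start_rpt : Prop := ∀ (jobs : List (List (Int × Int))) (release_times : List Int), Dom_giffler_thompson_earliest_start_rpt jobs release_times → Pre_giffler_thompson_earliest_start_rpt jobs release_times → Spec_giffler_thompson_earliest_start_rpt jobs release_times (giffler_thompson_earliest_start_rpt jobs release_times)

-- ===== LEMMAS AND PROOFS =====
def pvS (x : Nat × Nat × Int × Int × Int) : Int := x.2.2.2.1

def pvMinStep {α : Type} (key : α → Int) : Option α → α → Option α
  | none, x => some x
  | some m, x => if key x < key m then some x else some m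

def pvMaxStep {α : Type} (key : α → Int) : Option α → α → Option α
  | none, x => some x
  | some m, x => if key m < key x then some x else some m

def pvArgmStep (κ : (Nat × Nat × Int × Int × Int) → Int × Int) :
    Option (Nat × Nat × Int × Int × Int) → (Nat × Nat × Int × Int × Int) →
    Option (Nat × Nat × Int × Int × Int)
  | none, x => some x
  | some b, x => if pvLexLt (κ x) (κ b) then some x else some b

def pvArgm (κ : (Nat × Nat × Int × Int × Int) → Int × Int)
    (l : List (Nat × Nat × Int × Int × Int)) : Option (Nat × Nat × Int × Int × Int) :=
  l.foldl (pvArgmStep κ) none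

theorem pvMin?_eq {α : Type} (l : List α) (key : α → Int) :
    PySem.List.min? l key = l.foldl (pvMinStep key) none := by
  simp only [PySem.List.min?]
  exact PySem.List.foldl_congr_mem l _ _ none (by intro acc x _; cases acc <;> rfl)

theorem pvMax?_eq {α : Type} (l : List α) (key : α → Int) :
    PySem.List.max? l key = l.foldl (pvMaxStep key) none := by
  simp only [PySem.List.max?]
  exact PySem.List.foldl_congr_mem l _ _ none (by intro acc x _; cases acc <;> rfl)


theorem pvMinFold_some {α : Type} (key : α → Int) :
    ∀ (l : List α) (b : α), ∃ m, l.foldl (pvMinStep key) (some b) = some m := by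
  intro l
  induction l with
  | nil => intro b; exact ⟨b, rfl⟩
  | cons x xs ih =>
    intro b
    simp only [List.foldl_cons, pvMinStep]
    split_ifs
    · exact ih x
    · exact ih b

theorem pvSelAux (R : (Nat × Nat × Int × Int × Int) → Int) :
    ∀ (l : List (Nat × Nat × Int × Int × Int)) (m : Nat × Nat × Int × Int × Int),
      l.foldl (pvMinStep pvS) none = some m →
      ∃ b, pvArgm (fun x => (pvS x, -(R x))) l = some b ∧ pvS b = pvS m ∧
        some b = (l.filter (fun x => pvS x == pvS m)).foldl (pvMaxStep R) none := by
  intro l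
  induction l using List.reverseRecOn with
  | nil => intro m hm; simp at hm
  | append_singleton l x ih =>
    intro m hm
    rw [List.foldl_append] at hm
    simp only [List.foldl_cons, List.foldl_nil] at hm
    rcases hml : l.foldl (pvMinStep pvS) none with _ | m0
    · -- l must be empty
      have hlnil : l = [] := by
        cases l with
        | nil => rfl
        | cons y ys =>
          exfalso
          rw [List.foldl_cons] at hml
          obtain ⟨m', hm'⟩ := pvMinFold_some pvS ys y
          rw [show pvMinStep pvS none y = some y from rfl] at hml
          rw [hm'] at hml
          cases hml
      subst hlnil
      rw [hml] at hm
      rw [show pvMinStep pvS none x = some x from rfl] at hm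
      cases hm
      refine ⟨x, rfl, rfl, ?_⟩
      simp [pvMaxStep]
    · rw [hml] at hm
      obtain ⟨b, hbargm, hbs, hbmax⟩ := ih m0 hml
      have hlow : ∀ y ∈ l, pvS m0 ≤ pvS y := by
        have := PySem.List.min?_isMin (xs := l) (key := pvS) (m := m0)
        rw [pvMin?_eq] at this
        exact this hml
      rw [show pvMinStep pvS (some m0) x = if pvS x < pvS m0 then some x else some m0 from rfl] at hm
      unfold pvArgm at hbargm ⊢
      rw [List.foldl_append, List.foldl_cons, List.foldl_nil, hbargm]
      by_cases hx : pvS x < pvS m0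
      · rw [if_pos hx] at hm
        cases hm
        have hlt : pvLexLt (pvS x, -(R x)) (pvS b, -(R b)) = true := by
          simp [pvLexLt]; omega
        refine ⟨x, by simp [pvArgmStep, hlt], rfl, ?_⟩
        rw [List.filter_append]
        have h1 : l.filter (fun y => pvS y == pvS x) = [] := by
          rw [List.filter_eq_nil_iff]
          intro y hy
          have := hlow y hy
          simp only [beq_iff_eq]
          omega
        simp [h1, pvMaxStep]
      · rw [if_neg hx] at hm
        cases hm
        by_cases heq : pvS x = pvS m
        · have hfa : List.filter (fun y => pvS y == pvS m) (l ++ [x]) =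
              l.filter (fun y => pvS y == pvS m) ++ [x] := by
            rw [List.filter_append]
            simp [heq]
          rw [hfa, List.foldl_append, ← hbmax]
          simp only [List.foldl_cons, List.foldl_nil]
          rw [show (pvMaxStep R (some b) x) = if R b < R x then some x else some b from rfl]
          rw [show pvArgmStep (fun x => (pvS x, -(R x))) (some b) x =
              if pvLexLt (pvS x, -(R x)) (pvS b, -(R b)) then some x else some b from rfl]
          have hcond : pvLexLt (pvS x, -(R x)) (pvS b, -(R b)) = decide (R b < R x) := by
            have h1 : pvS x = pvS b := by omega
            simp [pvLexLt, h1]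
          rw [hcond]
          by_cases hr : R b < R x
          · simp [hr, heq]
          · simp [hr, hbs]
        · have hgt : pvS m < pvS x := by omega
          have hfa : List.filter (fun y => pvS y == pvS m) (l ++ [x]) =
              l.filter (fun y => pvS y == pvS m) := by
            rw [List.filter_append]
            simp [show ¬ (pvS x = pvS m) from heq]
          rw [hfa, ← hbmax]
          have hcond : pvLexLt (pvS x, -(R x)) (pvS b, -(R b)) = false := by
            simp [pvLexLt]
            omega
          refine ⟨b, ?_, hbs, rfl⟩
          rw [show pvArgmStep (fun x => (pvS x, -(R x))) (some b) x =
              if pvLexLt (pvS x, -(R x)) (pvS b, -(R b)) then some x else some b from rfl]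
          simp [hcond]

theorem pvInsertBy_head (key : (Nat × Nat × Int × Int × Int) → Int)
    (x : Nat × Nat × Int × Int × Int) (l : List (Nat × Nat × Int × Int × Int)) :
    (PySem.List.insertBy (fun a b => decide (key b < key a)) x l).head? =
      match l.head? with
      | none => some x
      | some y => if key y < key x then some x else some y := by
  cases l with
  | nil => rfl
  | cons y ys =>
    simp only [PySem.List.insertBy, List.head?_cons]
    simp only [decide_eq_true_eq]
    split_ifs with hc
    · rfl
    · rfl

theorem pvSorted_head_aux (key : (Nat × Nat × Int × Int × Int) → Int) :
    ∀ (l : List (Nat × Nat × Int × Int × Int)) (acc : List (Nat × Nat × Int × Int × Int)),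
      (l.foldl (fun acc x => PySem.List.insertBy (fun a b => decide (key b < key a)) x acc) acc).head? =
        l.foldl (fun h x => match h with
          | none => some x
          | some m => if key m < key x then some x else some m) acc.head? := by
  intro l
  induction l with
  | nil => intro acc; rfl
  | cons x xs ih =>
    intro acc
    simp only [List.foldl_cons]
    rw [ih]
    congr 1
    exact pvInsertBy_head key x acc

theorem pvSorted_head (l : List (Nat × Nat × Int × Int × Int))
    (key : (Nat × Nat × Int × Int × Int) → Int) :
    (PySem.List.sorted l key true).head? = PySem.List.max? l key := by
  have h := pvSorted_head_aux key l []
  rw [show PySem.List.sorted l key true =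
      List.foldl (fun acc x => PySem.List.insertBy (fun a b => decide (key b < key a)) x acc) [] l
    from rfl]
  rw [h]
  simp only [PySem.List.max?, List.head?_nil]
  exact PySem.List.foldl_congr_mem l _ _ none (by intro acc x _; cases acc <;> rfl)

theorem pvArgm_aux_mem (κ : (Nat × Nat × Int × Int × Int) → Int × Int) :
    ∀ (l : List (Nat × Nat × Int × Int × Int)) (acc : Option (Nat × Nat × Int × Int × Int))
      (b : Nat × Nat × Int × Int × Int),
      l.foldl (pvArgmStep κ) acc = some b → acc = some b ∨ b ∈ l := by
  intro l
  induction l with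
  | nil => intro acc b h; exact Or.inl h
  | cons x xs ih =>
    intro acc b h
    simp only [List.foldl_cons] at h
    rcases ih _ b h with h' | h'
    · match acc with
      | none => simp [pvArgmStep] at h'; subst h'; exact Or.inr List.mem_cons_self
      | some a =>
        rw [show pvArgmStep κ (some a) x = if pvLexLt (κ x) (κ a) then some x else some a from rfl] at h'
        split_ifs at h'
        · simp at h'; subst h'; exact Or.inr List.mem_cons_self
        · exact Or.inl h'
    · exact Or.inr (List.mem_cons_of_mem _ h')

theorem pvArgm_mem (κ : (Nat × Nat × Int × Int × Int) → Int × Int)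
    (l : List (Nat × Nat × Int × Int × Int)) (b : Nat × Nat × Int × Int × Int)
    (h : pvArgm κ l = some b) : b ∈ l := by
  rcases pvArgm_aux_mem κ l none b h with h' | h'
  · cases h'
  · exact h'

-- the pvOp abbreviation of the per-index available operation
def pvOp (jobs : List (List (Int × Int))) (next : List Nat) (mfree ready : List Int) (j : Nat) :
    Nat × Nat × Int × Int × Int :=
  (j, next.getD j 0, ((jobs.getD j []).getD (next.getD j 0) (0, 0)).1,
   max (PySem.List.pyGetD mfree (((jobs.getD j []).getD (next.getD j 0) (0, 0)).1 - 1) 0)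
       (ready.getD j 0),
   ((jobs.getD j []).getD (next.getD j 0) (0, 0)).2)

theorem pvAvailA_eq (jobs : List (List (Int × Int))) (next : List Nat) (mfree ready : List Int) :
    pvAvailA jobs next mfree ready =
      ((List.range jobs.length).filter
          (fun j => decide (next.getD j 0 < (jobs.getD j []).length))).map
        (pvOp jobs next mfree ready) := by
  unfold pvAvailA
  have h := PySem.List.foldl_append_if
    (fun j => decide (next.getD j 0 < (jobs.getD j []).length))
    (pvOp jobs next mfree ready) (List.range jobs.length) []
  simp only [decide_eq_true_eq, List.nil_append] at h
  rw [← h]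
  rfl

theorem pvBestB_eq (jobs : List (List (Int × Int))) (next : List Nat) (mfree ready rpt : List Int) :
    pvBestB jobs next mfree ready rpt =
      Option.map (fun x => ((pvS x, -(rpt.getD x.1 0)), x))
        (pvArgm (fun x => (pvS x, -(rpt.getD x.1 0))) (pvAvailA jobs next mfree ready)) := by
  rw [pvAvailA_eq]
  unfold pvArgm
  rw [List.foldl_map, List.foldl_filter]
  have haux : ∀ (l : List Nat) (acc : Option (Nat × Nat × Int × Int × Int)),
      l.foldl (fun best j =>
          if next.getD j 0 < (jobs.getD j []).length then
            (match best with
             | none => some (((pvS (pvOp jobs next mfree ready j),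
                 -(rpt.getD j 0))), pvOp jobs next mfree ready j)
             | some b => if pvLexLt (pvS (pvOp jobs next mfree ready j), -(rpt.getD j 0)) b.1
                 then some (((pvS (pvOp jobs next mfree ready j), -(rpt.getD j 0))),
                   pvOp jobs next mfree ready j)
                 else best)
          else best)
        (Option.map (fun x => ((pvS x, -(rpt.getD x.1 0)), x)) acc) =
      Option.map (fun x => ((pvS x, -(rpt.getD x.1 0)), x))
        (l.foldl (fun best j =>
          if next.getD j 0 < (jobs.getD j []).length then
            pvArgmStep (fun x => (pvS x, -(rpt.getD x.1 0))) best (pvOp jobs next mfree ready j)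
          else best) acc) := by
    intro l
    induction l with
    | nil => intro acc; rfl
    | cons x xs ih =>
      intro acc
      simp only [List.foldl_cons]
      by_cases hc : next.getD x 0 < (jobs.getD x []).length
      · rw [if_pos hc, if_pos hc]
        cases acc with
        | none => exact ih (some (pvOp jobs next mfree ready x))
        | some b =>
          show _ = Option.map _ (xs.foldl _ (pvArgmStep _ (some b) (pvOp jobs next mfree ready x)))
          rw [show pvArgmStep (fun x => (pvS x, -(rpt.getD x.1 0))) (some b)
              (pvOp jobs next mfree ready x) =
              if pvLexLt (pvS (pvOp jobs next mfree ready x), -(rpt.getD x 0))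
                  (pvS b, -(rpt.getD b.1 0))
                then some (pvOp jobs next mfree ready x) else some b from rfl]
          split_ifs with hlt
          · show (xs.foldl _ (if pvLexLt _ (pvS b, -(rpt.getD b.1 0)) then _ else _)) = _
            rw [if_pos hlt]
            exact ih (some (pvOp jobs next mfree ready x))
          · show (xs.foldl _ (if pvLexLt _ (pvS b, -(rpt.getD b.1 0)) then _ else _)) = _
            rw [if_neg hlt]
            exact ih (some b)
      · rw [if_neg hc, if_neg hc]
        exact ih acc
  have hlhs : pvBestB jobs next mfree ready rpt =
      (List.range jobs.length).foldl (fun best j =>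
          if next.getD j 0 < (jobs.getD j []).length then
            (match best with
             | none => some (((pvS (pvOp jobs next mfree ready j),
                 -(rpt.getD j 0))), pvOp jobs next mfree ready j)
             | some b => if pvLexLt (pvS (pvOp jobs next mfree ready j), -(rpt.getD j 0)) b.1
                 then some (((pvS (pvOp jobs next mfree ready j), -(rpt.getD j 0))),
                   pvOp jobs next mfree ready j)
                 else best)
          else best) none := by
    unfold pvBestB
    apply PySem.List.foldl_congr_mem
    intro acc j _
    by_cases hc : next.getD j 0 < (jobs.getD j []).length
    · rw [if_pos hc, if_pos hc]
      cases acc <;> rfl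
    · rw [if_neg hc, if_neg hc]
  rw [hlhs]
  have := haux (List.range jobs.length) none
  simp only [Option.map_none] at this
  rw [this]
  congr 1
  apply PySem.List.foldl_congr_mem
  intro acc j _
  by_cases hc : next.getD j 0 < (jobs.getD j []).length
  · simp
  · simp

theorem pvSumRange' (job : List (Int × Int)) :
    ∀ (d k : Nat), k + d = job.length →
      ((List.range' k d).map (fun i => (job.getD i (0, 0)).2)).sum =
        ((job.drop k).map (fun p => p.2)).sum := by
  intro d
  induction d with
  | zero =>
    intro k hk
    rw [List.drop_of_length_le (by omega)]
    simp
  | succ d ih =>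
    intro k hk
    have hklt : k < job.length := by omega
    rw [List.range'_succ, List.drop_eq_getElem_cons hklt]
    simp only [List.map_cons, List.sum_cons]
    rw [ih (k + 1) (by omega), List.getD_eq_getElem _ _ hklt]

theorem pvRptA_eq_sum' (job : List (Int × Int)) (k : Nat) :
    ((List.range' k (job.length - k)).foldl (fun total i => total + (job.getD i (0, 0)).2) 0) =
      ((job.drop k).map (fun p => p.2)).sum := by
  rw [PySem.List.foldl_add _ (fun i => (job.getD i (0, 0)).2) 0, zero_add]
  by_cases hk : k ≤ job.length
  · rw [pvSumRange' job (job.length - k) k (by omega)]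
  · rw [List.drop_of_length_le (by omega)]
    have : job.length - k = 0 := by omega
    simp [this]

theorem pvRptA_eq_sum (jobs : List (List (Int × Int))) (next : List Nat) (j : Nat) :
    pvRptA jobs next j = (((jobs.getD j []).drop (next.getD j 0)).map (fun p => p.2)).sum := by
  unfold pvRptA
  exact pvRptA_eq_sum' (jobs.getD j []) (next.getD j 0)

def pvRem (jobs : List (List (Int × Int))) (next : List Nat) : Nat :=
  ∑ j ∈ Finset.range jobs.length, ((jobs.getD j []).length - next.getD j 0)

theorem pvRem_zero (jobs : List (List (Int × Int))) (next : List Nat)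
    (_hle : ∀ j, next.getD j 0 ≤ (jobs.getD j []).length) (h : pvRem jobs next = 0) :
    ∀ j, ¬ (next.getD j 0 < (jobs.getD j []).length) := by
  intro j
  by_cases hj : j < jobs.length
  · have := (Finset.sum_eq_zero_iff.mp h) j (Finset.mem_range.mpr hj)
    omega
  · have h0 : jobs.getD j [] = [] := List.getD_eq_default _ _ (by omega)
    rw [h0]; simp
theorem pvRem_pos (jobs : List (List (Int × Int))) (next : List Nat) (h : pvRem jobs next ≠ 0) :
    ∃ j ∈ List.range jobs.length, next.getD j 0 < (jobs.getD j []).length := by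
  obtain ⟨j, hj, hne⟩ := Finset.exists_ne_zero_of_sum_ne_zero h
  exact ⟨j, List.mem_range.mpr (Finset.mem_range.mp hj), by omega⟩
theorem pvRem_set (jobs : List (List (Int × Int))) (next : List Nat) (j : Nat)
    (hlen : next.length = jobs.length) (hj : j < jobs.length)
    (hc : next.getD j 0 < (jobs.getD j []).length) :
    pvRem jobs (next.set j (next.getD j 0 + 1)) + 1 = pvRem jobs next := by
  unfold pvRem
  have hmem : j ∈ Finset.range jobs.length := Finset.mem_range.mpr hj
  rw [← Finset.add_sum_erase _ _ hmem, ← Finset.add_sum_erase _ _ hmem]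
  have hset : (next.set j (next.getD j 0 + 1)).getD j 0 = next.getD j 0 + 1 := by
    simp [List.getD_eq_getElem?_getD, hlen ▸ hj]
  have herase : ∀ i ∈ (Finset.range jobs.length).erase j,
      (jobs.getD i []).length - (next.set j (next.getD j 0 + 1)).getD i 0 =
      (jobs.getD i []).length - next.getD i 0 := by
    intro i hi
    have hne : i ≠ j := (Finset.mem_erase.mp hi).1
    simp only [List.getD_eq_getElem?_getD, List.getElem?_set]
    rw [if_neg (by omega)]
  rw [Finset.sum_congr rfl herase, hset]
  omega
theorem pvGetD_sum (l : List Nat) : ∑ j ∈ Finset.range l.length, l.getD j 0 = l.sum := by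
  induction l with
  | nil => simp
  | cons a t ih =>
    rw [List.length_cons, Finset.sum_range_succ']
    simp only [List.getD_cons_succ, List.getD_cons_zero, List.sum_cons]
    rw [ih]; omega
theorem pvRem_init (jobs : List (List (Int × Int))) :
    pvRem jobs (List.replicate jobs.length 0) = (jobs.map List.length).sum := by
  unfold pvRem
  have h1 : ∀ j ∈ Finset.range jobs.length,
      (jobs.getD j []).length - (List.replicate jobs.length (0:Nat)).getD j 0 =
      (jobs.map List.length).getD j 0 := by
    intro j hj
    have hj' := Finset.mem_range.mp hj
    simp [List.getD_eq_getElem?_getD, hj']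
  rw [Finset.sum_congr rfl h1]
  have := pvGetD_sum (jobs.map List.length)
  rw [List.length_map] at this
  exact this

theorem pvLoop_eq (jobs : List (List (Int × Int))) : ∀ (K : Nat) (next : List Nat)
    (mfree ready rpt : List Int) (sched : List (Int × Int × Int × Int × Int)),
    next.length = jobs.length → rpt.length = jobs.length →
    (∀ j, next.getD j 0 ≤ (jobs.getD j []).length) →
    (∀ j, rpt.getD j 0 = (((jobs.getD j []).drop (next.getD j 0)).map (fun p => p.2)).sum) →
    pvRem jobs next = K →
    pvLoopA jobs (K + 1) next mfree ready sched = pvLoopB jobs K next mfree ready rpt sched := by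
  intro K
  induction K with
  | zero =>
    intro next mfree ready rpt sched hlen hrlen hle hrpt hrem
    have hav : pvAvailA jobs next mfree ready = [] := by
      rw [pvAvailA_eq]
      rw [List.filter_eq_nil_iff.mpr ?_]
      · rfl
      · intro j _
        simpa using pvRem_zero jobs next hle hrem j
    simp only [pvLoopA, pvLoopB, hav]
  | succ K ih =>
    intro next mfree ready rpt sched hlen hrlen hle hrpt hrem
    obtain ⟨j0, hj0r, hj0c⟩ := pvRem_pos jobs next (by omega)
    have havmem : pvOp jobs next mfree ready j0 ∈ pvAvailA jobs next mfree ready := by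
      rw [pvAvailA_eq]
      exact List.mem_map_of_mem (List.mem_filter.mpr ⟨hj0r, by simpa using hj0c⟩)
    obtain ⟨a, rest, haeq⟩ : ∃ a rest, pvAvailA jobs next mfree ready = a :: rest := by
      cases h : pvAvailA jobs next mfree ready with
      | nil => rw [h] at havmem; cases havmem
      | cons a rest => exact ⟨a, rest, rfl⟩
    obtain ⟨mn, hmn⟩ : ∃ mn,
        (pvAvailA jobs next mfree ready).foldl (pvMinStep pvS) none = some mn := by
      rw [haeq, List.foldl_cons]
      exact pvMinFold_some pvS rest a
    obtain ⟨b, hbargm, hbs, hbmax⟩ := pvSelAux (fun x => pvRptA jobs next x.1)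
      (pvAvailA jobs next mfree ready) mn hmn
    -- b comes from some index j with an unfinished operation
    obtain ⟨j, hjf, hbop⟩ : ∃ j, (j ∈ (List.range jobs.length).filter
          (fun j => decide (next.getD j 0 < (jobs.getD j []).length))) ∧
        pvOp jobs next mfree ready j = b := by
      have hmem : b ∈ pvAvailA jobs next mfree ready := pvArgm_mem _ _ b hbargm
      rw [pvAvailA_eq] at hmem
      exact List.mem_map.mp hmem
    have hjlt : j < jobs.length := List.mem_range.mp (List.mem_filter.mp hjf).1
    have hjc : next.getD j 0 < (jobs.getD j []).length := by
      simpa using (List.mem_filter.mp hjf).2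
    -- A's head of cands2 is b
    have hminq : PySem.List.min? (pvAvailA jobs next mfree ready)
        (fun x => x.2.2.2.1) = some mn := by
      rw [show (fun x : Nat × Nat × Int × Int × Int => x.2.2.2.1) = pvS from rfl, pvMin?_eq]
      exact hmn
    have hmax : PySem.List.max? ((pvAvailA jobs next mfree ready).filter
        (fun x => pvS x == pvS mn)) (fun x => pvRptA jobs next x.1) = some b := by
      rw [pvMax?_eq]
      exact hbmax.symm
    have hhead : (if 1 < ((pvAvailA jobs next mfree ready).filter
          (fun x => pvS x == pvS mn)).length then
        PySem.List.sorted ((pvAvailA jobs next mfree ready).filter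
          (fun x => pvS x == pvS mn)) (fun x => pvRptA jobs next x.1) true
        else (pvAvailA jobs next mfree ready).filter (fun x => pvS x == pvS mn)).head? =
        some b := by
      split_ifs with hlen1
      · rw [pvSorted_head]
        exact hmax
      · have hbmem : b ∈ (pvAvailA jobs next mfree ready).filter
            (fun x => pvS x == pvS mn) := PySem.List.max?_mem hmax
        match hc : (pvAvailA jobs next mfree ready).filter (fun x => pvS x == pvS mn) with
        | [] => rw [hc] at hbmem; cases hbmem
        | c :: t =>
          rw [hc] at hlen1 hbmem
          have ht : t = [] := by
            cases t with
            | nil => rfl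
            | cons u v => exfalso; simp at hlen1
          subst ht
          simp at hbmem
          subst hbmem
          rfl
    -- B's best is b (the two keys agree everywhere)
    have hkeys : (fun x : Nat × Nat × Int × Int × Int => (pvS x, -(pvRptA jobs next x.1))) =
        (fun x => (pvS x, -(rpt.getD x.1 0))) := by
      funext x
      rw [pvRptA_eq_sum, ← hrpt x.1]
    have hbest : pvBestB jobs next mfree ready rpt = some ((pvS b, -(rpt.getD b.1 0)), b) := by
      rw [pvBestB_eq, ← hkeys, hbargm]
      rfl
    -- reduce one step of each loop
    obtain ⟨bj, bk, bm, bs, bt⟩ := b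
    have hbj : j = bj := by
      have := congrArg (fun x => x.1) hbop; simpa using this
    subst hbj
    have hbk : bk = next.getD j 0 := by
      have := congrArg (fun x => x.2.1) hbop; simpa using this.symm
    have hbt : bt = ((jobs.getD j []).getD (next.getD j 0) (0, 0)).2 := by
      have := congrArg (fun x => x.2.2.2.2) hbop; simpa using this.symm
    rw [pvLoopA, pvLoopB, hbest, haeq]
    dsimp only
    rw [← haeq]
    have hminD : PySem.List.minD (pvAvailA jobs next mfree ready) (fun x => x.2.2.2.1) a = mn := by
      unfold PySem.List.minD
      rw [hminq]
      rfl
    rw [hminD]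
    rw [show (fun x : Nat × Nat × Int × Int × Int => x.2.2.2.1 == mn.2.2.2.1) =
        (fun x => pvS x == pvS mn) from rfl]
    have hc2 : ∃ tl, (if 1 < ((pvAvailA jobs next mfree ready).filter
          (fun x => pvS x == pvS mn)).length then
        PySem.List.sorted ((pvAvailA jobs next mfree ready).filter
          (fun x => pvS x == pvS mn)) (fun x => pvRptA jobs next x.1) true
        else (pvAvailA jobs next mfree ready).filter (fun x => pvS x == pvS mn)) =
        (j, bk, bm, bs, bt) :: tl := by
      match hcc : (if 1 < ((pvAvailA jobs next mfree ready).filter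
          (fun x => pvS x == pvS mn)).length then
        PySem.List.sorted ((pvAvailA jobs next mfree ready).filter
          (fun x => pvS x == pvS mn)) (fun x => pvRptA jobs next x.1) true
        else (pvAvailA jobs next mfree ready).filter (fun x => pvS x == pvS mn)) with
      | [] => rw [hcc] at hhead; cases hhead
      | c :: tl =>
        rw [hcc] at hhead
        simp at hhead
        exact ⟨tl, by rw [hhead]⟩
    obtain ⟨tl, htl⟩ := hc2
    rw [htl]
    dsimp only
    have hjnext : j < next.length := by omega
    have hjrpt : j < rpt.length := by omega
    apply ih
    · rw [List.length_set]; exact hlen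
    · rw [List.length_set]; exact hrlen
    · intro j'
      by_cases hjj : j = j'
      · subst hjj
        have hset : (next.set j (next.getD j 0 + 1)).getD j 0 = next.getD j 0 + 1 := by
          simp [List.getD_eq_getElem?_getD, List.getElem?_set_self hjnext]
        rw [hset]
        omega
      · have hset : (next.set j (next.getD j 0 + 1)).getD j' 0 = next.getD j' 0 := by
          simp only [List.getD_eq_getElem?_getD, List.getElem?_set]
          rw [if_neg hjj]
        rw [hset]
        exact hle j'
    · intro j'
      by_cases hjj : j = j'
      · subst hjj
        have hset : (next.set j (next.getD j 0 + 1)).getD j 0 = next.getD j 0 + 1 := by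
          simp [List.getD_eq_getElem?_getD, List.getElem?_set_self hjnext]
        have hsetr : (rpt.set j (rpt.getD j 0 - bt)).getD j 0 = rpt.getD j 0 - bt := by
          simp [List.getD_eq_getElem?_getD, List.getElem?_set_self hjrpt]
        rw [hset, hsetr, hrpt j]
        rw [List.drop_eq_getElem_cons hjc]
        simp only [List.map_cons, List.sum_cons]
        rw [hbt, List.getD_eq_getElem _ _ hjc]
        omega
      · have hset : (next.set j (next.getD j 0 + 1)).getD j' 0 = next.getD j' 0 := by
          simp only [List.getD_eq_getElem?_getD, List.getElem?_set]
          rw [if_neg hjj]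
        have hsetr : (rpt.set j (rpt.getD j 0 - bt)).getD j' 0 = rpt.getD j' 0 := by
          simp only [List.getD_eq_getElem?_getD, List.getElem?_set]
          rw [if_neg hjj]
        rw [hset, hsetr]
        exact hrpt j'
    · have := pvRem_set jobs next j hlen hjlt hjc
      omega


-- ===== VERDICT (by name: the statement is the Claim_ definition above) =====
theorem giffler_thompson_earliest_start_rpt_spec : Claim_equal_giffler_thompson_earliest_start_rpt := by
  intro jobs release_times _ _
  unfold Spec_giffler_thompson_earliest_start_rpt giffler_thompson_earliest_start_rpt
    giffler_thompson_earliest_start_rpt_alt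
  rw [← pvRem_init jobs]
  apply pvLoop_eq
  · simp
  · simp
  · intro j
    have : (List.replicate jobs.length (0:Nat)).getD j 0 = 0 := by
      simp [List.getD_eq_getElem?_getD, List.getElem?_replicate]
      split <;> rfl
    rw [this]; exact Nat.zero_le _
  · intro j
    have h0 : (List.replicate jobs.length (0:Nat)).getD j 0 = 0 := by
      simp [List.getD_eq_getElem?_getD, List.getElem?_replicate]
      split <;> rfl
    rw [h0, List.drop_zero]
    by_cases hj : j < jobs.length
    · simp [List.getD_eq_getElem?_getD, hj]
    · rw [List.getD_eq_default, List.getD_eq_default] <;> simp [List.length_map] at * <;> omega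
  · rfl
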